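-- pv_equiv track=rewrite | github.com/Airstriker123/Cyan-2.0 | me/cyan/app/features/Math Solver.py | MainColor2
-- ===== SOURCE A (Python) =====
-- def MainColor2(text):
--     # Define start and end colors (RGB values)
--     start_color = (0, 200, 150)  # RGB color (light greenish-blue)
--     end_color = (0, 255, 255)  # RGB color (cyan)
--
--     num_steps = 16  # Number of gradient transition steps
--     # Generate a gradient color transition
--     colors = [
--         (
--             start_color[0] + (end_color[0] - start_color[0]) * i // (num_steps - 1),
--             start_color[1] + (end_color[1] - start_color[1]) * i // (num_steps - 1),
--             start_color[2] + (end_color[2] - start_color[2]) * i // (num_steps - 1),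
--         )
--         for i in range(num_steps)
--     ]
--     colors += list(reversed(colors[:-1]))  # Mirror the colors to create a smooth loop effect
--
--     # Function to convert RGB values to ANSI escape codes for terminal colors
--     def text_color(r, g, b):
--         return f"\033[38;2;{r};{g};{b}m"
--
--     result = []
--     lines = text.split("\n")  # Split text into lines
--     for i, line in enumerate(lines):
--         color_index = i % len(colors)  # Cycle through colors
--         r, g, b = colors[color_index]
--         colored_line = text_color(r, g, b) + line + "\033[0m"  # Apply color and reset at the end
--         result.append(colored_line)
--
--     return "\n".join(result)  # Join the lines back into a single string
-- ===== SOURCE B (Python) =====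
-- def MainColor2(text):
--     # Compute each line's color directly from its index (period-31 triangle wave),
--     # instead of precomputing a mirrored palette table.
--     out = []
--     for i, line in enumerate(text.split("\n")):
--         c = i % 31
--         j = c if c <= 15 else 30 - c
--         g = 200 + 55 * j // 15
--         b = 150 + 105 * j // 15
--         out.append(f"\033[38;2;0;{g};{b}m{line}\033[0m")
--     return "\n".join(out)
-- ===== Notes on version B (the rewrite author's own statement) =====
-- stated objective: simpler
-- what changed: B drops A's precomputed 31-entry mirrored palette table (built from a 16-step gradient comprehension plus a reversed copy) and instead computes each line's color on the fly from its index via a period-31 triangle fold j = c if c<=15 else 30-c, building the ANSI escape inline.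
import Mathlib
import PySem

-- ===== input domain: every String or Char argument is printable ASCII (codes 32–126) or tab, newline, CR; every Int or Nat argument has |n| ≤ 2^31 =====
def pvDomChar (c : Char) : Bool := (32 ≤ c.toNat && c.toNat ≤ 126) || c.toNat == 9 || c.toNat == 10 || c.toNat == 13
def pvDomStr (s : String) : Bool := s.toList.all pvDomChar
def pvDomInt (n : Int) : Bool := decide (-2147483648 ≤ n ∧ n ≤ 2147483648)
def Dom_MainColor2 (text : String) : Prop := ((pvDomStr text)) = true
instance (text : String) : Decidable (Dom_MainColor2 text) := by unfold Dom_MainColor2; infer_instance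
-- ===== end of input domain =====

-- B replaces A's precomputed mirrored palette table by an on-the-fly triangle-fold
-- computation of each line's color from its index (simpler decomposition, same cost).

-- ===== PORT A =====
-- gradient palette: 16 steps, then mirrored (colors += reversed(colors[:-1]))
def mcColors : List (Int × Int × Int) :=
  let base := (PySem.List.pyRange 0 16 1).map (fun i =>
    (0 + PySem.Int.floordiv ((0 - 0) * i) (16 - 1),
     200 + PySem.Int.floordiv ((255 - 200) * i) (16 - 1),
     150 + PySem.Int.floordiv ((255 - 150) * i) (16 - 1)))
  base ++ (PySem.List.slice base none (some (-1))).reverse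

-- Python inner helper text_color(r, g, b)
def mcTextColor (r g b : Int) : String :=
  "\x1b[38;2;" ++ PySem.Int.toStr r ++ ";" ++ PySem.Int.toStr g ++ ";" ++ PySem.Int.toStr b ++ "m"

def MainColor2 (text : String) : String :=
  let colors := mcColors
  let lines := (PySem.Str.split? text "\n").getD []
  let result := (PySem.List.enumerate lines 0).foldl (fun acc (p : Int × String) =>
    let colorIndex := PySem.Int.mod p.1 (colors.length : Int)
    let rgb := PySem.List.pyGetD colors colorIndex (0, 0, 0)  -- index i % 31 is always in range
    acc ++ [mcTextColor rgb.1 rgb.2.1 rgb.2.2 ++ p.2 ++ "\x1b[0m"]) []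
  PySem.Str.join "\n" result

-- ===== PORT B =====
def MainColor2_alt (text : String) : String :=
  PySem.Str.join "\n" ((PySem.List.enumerate ((PySem.Str.split? text "\n").getD []) 0).map
    (fun (p : Int × String) =>
      let c := PySem.Int.mod p.1 31
      let j := if c ≤ 15 then c else 30 - c
      let g := 200 + PySem.Int.floordiv (55 * j) 15
      let b := 150 + PySem.Int.floordiv (105 * j) 15
      "\x1b[38;2;0;" ++ PySem.Int.toStr g ++ ";" ++ PySem.Int.toStr b ++ "m" ++ p.2 ++ "\x1b[0m"))

-- ===== PRECONDITION & SPEC =====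
def Spec_MainColor2 (text : String) (out : String) : Prop := out = MainColor2_alt text
instance (text : String) (out : String) : Decidable (Spec_MainColor2 text out) := by unfold Spec_MainColor2; infer_instance

-- ===== CLAIM (what is proved, stated in full; the proofs are below) =====
def Claim_equal_MainColor2 : Prop := ∀ (text : String), Dom_MainColor2 text → Spec_MainColor2 text (MainColor2 text)

-- ===== LEMMAS AND PROOFS =====

lemma mc_foldl_app {α β : Type} (f : α → β) :
    ∀ (l : List α) (acc : List β),
      l.foldl (fun a x => a ++ [f x]) acc = acc ++ l.map f := by
  intro l
  induction l with
  | nil => simp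
  | cons x xs ih => intro acc; simp [List.foldl, ih]

-- the palette lookup agrees with the triangle-fold formula on every residue c < 31
lemma mc_lookup (c : Nat) (hc : c < 31) :
    PySem.List.pyGetD mcColors ((c : Int)) (0, 0, 0) =
      (0,
       200 + PySem.Int.floordiv (55 * (if (c : Int) ≤ 15 then (c : Int) else 30 - (c : Int))) 15,
       150 + PySem.Int.floordiv (105 * (if (c : Int) ≤ 15 then (c : Int) else 30 - (c : Int))) 15) := by
  revert hc
  revert c
  decide

lemma mc_len : (mcColors.length : Int) = 31 := by decide

lemma mc_line (i : Int) (line : String) :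
    (mcTextColor (PySem.List.pyGetD mcColors (PySem.Int.mod i (mcColors.length : Int)) (0, 0, 0)).1
        (PySem.List.pyGetD mcColors (PySem.Int.mod i (mcColors.length : Int)) (0, 0, 0)).2.1
        (PySem.List.pyGetD mcColors (PySem.Int.mod i (mcColors.length : Int)) (0, 0, 0)).2.2
      ++ line ++ "\x1b[0m") =
    ("\x1b[38;2;0;"
      ++ PySem.Int.toStr (200 + PySem.Int.floordiv (55 * (if PySem.Int.mod i 31 ≤ 15 then PySem.Int.mod i 31 else 30 - PySem.Int.mod i 31)) 15) ++ ";"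
      ++ PySem.Int.toStr (150 + PySem.Int.floordiv (105 * (if PySem.Int.mod i 31 ≤ 15 then PySem.Int.mod i 31 else 30 - PySem.Int.mod i 31)) 15) ++ "m"
      ++ line ++ "\x1b[0m") := by
  rw [mc_len]
  have hm : PySem.Int.mod i 31 = i % 31 := PySem.Int.mod_eq_emod_of_pos (by norm_num)
  have h0 : 0 ≤ i % 31 := Int.emod_nonneg i (by norm_num)
  have hlt : i % 31 < 31 := Int.emod_lt_of_pos i (by norm_num)
  set m := i % 31 with hmdef
  have hcast : m = ((m.toNat : Nat) : Int) := (Int.toNat_of_nonneg h0).symm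
  have hclt : m.toNat < 31 := by omega
  rw [hm, hcast, mc_lookup m.toNat hclt]
  have hpre : ("\x1b[38;2;" ++ PySem.Int.toStr 0 ++ ";") = "\x1b[38;2;0;" := by decide
  simp only [mcTextColor]
  rw [hpre]

theorem MainColor2_spec_aux (text : String) :
    MainColor2 text = MainColor2_alt text := by
  simp only [MainColor2, MainColor2_alt]
  rw [mc_foldl_app]
  simp only [List.nil_append]
  congr 1
  apply List.map_congr_left
  intro p hp
  rcases (PySem.List.mem_enumerate_iff _ _ _).1 hp with ⟨k, hk, hpk⟩
  subst hpk
  exact mc_line ((0 : Int) + (k : Int)) (((PySem.Str.split? text "\n").getD [])[k])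

-- ===== VERDICT (by name: the statement is the Claim_ definition above) =====
theorem MainColor2_spec : Claim_equal_MainColor2 := by
  intro text _
  exact MainColor2_spec_aux text
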